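-- pv_equiv track=rewrite | github.com/garam0107/IM | IM대비/경비원.py | bouncer
-- ===== SOURCE A (Python) =====
-- def bouncer(W,L,N,arr,dir,dist): # W: 가로, L: 세로, arr: 마트 좌표 리스트 , dir,dist: 경비원 좌표
--     total_dist = 0
--     # 1: 북 , 2: 남, 3: 서 , 4: 동
--     for i in range(N):
--         if dir == arr[i][0]:                 # 같은 방향일 때는 경비원 위치에서 마트 위치 빼고 절댓값 씌우기
--             total_dist += abs(dist-arr[i][1])
--         elif dir == 1 and arr[i][0] == 2 or dir == 2 and arr[i][0] == 1:         # 북-남, 남-북 : 시계 방향과 반시계 방향중 최단 거리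
--             total_dist += min(L+dist+arr[i][1], L+(W-dist)+(W-arr[i][1]))
--         elif dir == 1 and arr[i][0] == 3 or dir == 3 and arr[i][0] == 1:         # 서-북, 북-서 : 경비원 좌표 마트 좌표만 더해주면 됨
--             total_dist += dist + arr[i][1]
--         elif dir == 1 and arr[i][0] == 4:                   # 북-동: 가로 길이에서 경비원 좌표 뺀 값 + 마트 좌표
--             total_dist += (W-dist) + arr[i][1]
--         elif dir == 4 and arr[i][0] == 1:                   # 동-북: 위와 반대
--             total_dist += (W-arr[i][1]) + dist
--         elif dir == 2 and arr[i][0] == 3:                   # 남-서: 경비원 좌표 + 세로 길이에서 마트 좌표 뺀 값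
--             total_dist += dist + (L - arr[i][1])
--         elif dir == 3 and arr[i][0] == 2:                   # 서-남: 위와 반대
--             total_dist += arr[i][1] + (L-dist)
--         elif dir == 2 and arr[i][0] == 4:                   # 남-동: 가로 길이에서 경비원 좌표 뺀 값 + 세로 길이에서 마트 좌표 뺀 값
--             total_dist += (W-dist) + (L - arr[i][1])
--         elif dir == 4 and arr[i][0] == 2:                   # 동-남: 위와 반대
--             total_dist += (L - dist) + (W - arr[i][1])
--         elif dir == 3 and arr[i][0] == 4 or dir == 4 and arr[i][0] == 3:    # 서-동, 동-서: 시계 방향과 반시계 방향 중 최단 거리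
--             total_dist += min(W+dist+arr[i][1], W+(L-dist)+(L-arr[i][1]))
--     return total_dist
-- ===== SOURCE B (Python) =====
-- def bouncer(W, L, N, arr, dir, dist):
--     # Walk the building's perimeter as one clockwise ring starting at the NW corner.
--     P = 2 * (W + L)
--
--     def ring(side):
--         # clockwise ring index of a side code; -1 for an unknown code
--         if side == 1: return 0   # north
--         if side == 4: return 1   # east
--         if side == 2: return 2   # south
--         if side == 3: return 3   # west
--         return -1
--
--     def pos(side, c):
--         # linear coordinate along the clockwise ring
--         if side == 1: return c
--         if side == 4: return W + c
--         if side == 2: return 2 * W + L - c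
--         return P - c             # side 3 (west)
--
--     total = 0
--     for mart in arr[:max(0, N)]:
--         side, c = mart[0], mart[1]
--         if side == dir:
--             total += abs(dist - c)
--             continue
--         rg, rm = ring(dir), ring(side)
--         if rg < 0 or rm < 0:
--             continue             # codes outside 1..4 contribute nothing
--         tg, tm = pos(dir, dist), pos(side, c)
--         if rg < rm:
--             rlo, tlo, rhi, thi = rg, tg, rm, tm
--         else:
--             rlo, tlo, rhi, thi = rm, tm, rg, tg
--         if rhi - rlo == 2:       # opposite sides: shorter of the two ways around
--             d = thi - tlo
--             total += min(d, P - d)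
--         elif rhi - rlo == 1:     # adjacent sides: through the shared corner
--             total += thi - tlo
--         else:                    # adjacent through the NW corner (ring 3 and 0)
--             total += tlo + P - thi
--     return total
-- ===== Notes on version B (the rewrite author's own statement) =====
-- stated objective: simpler
-- what changed: Replaces A's 11-branch pairwise case table by mapping every (side, offset) to one linear coordinate on the clockwise perimeter ring and computing each distance uniformly from ring indices and ring positions.
-- outside the precondition, e.g. on bouncer(1, 1, 1, [[9]], 5, 0): A returns 0, B raises IndexError
import Mathlib
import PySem

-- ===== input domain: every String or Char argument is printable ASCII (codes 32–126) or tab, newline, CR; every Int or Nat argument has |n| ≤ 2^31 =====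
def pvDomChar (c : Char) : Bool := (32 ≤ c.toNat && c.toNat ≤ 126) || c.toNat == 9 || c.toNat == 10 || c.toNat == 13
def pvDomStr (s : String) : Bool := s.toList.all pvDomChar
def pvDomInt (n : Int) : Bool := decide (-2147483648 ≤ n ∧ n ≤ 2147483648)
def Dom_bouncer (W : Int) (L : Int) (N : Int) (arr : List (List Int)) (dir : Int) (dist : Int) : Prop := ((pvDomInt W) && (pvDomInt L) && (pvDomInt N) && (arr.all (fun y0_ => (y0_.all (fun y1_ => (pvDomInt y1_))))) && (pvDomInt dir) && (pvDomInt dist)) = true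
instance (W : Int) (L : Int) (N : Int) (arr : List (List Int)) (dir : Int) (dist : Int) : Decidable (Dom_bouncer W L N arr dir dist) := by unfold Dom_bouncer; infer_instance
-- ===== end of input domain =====

-- B replaces A's 11-branch pairwise case table by a uniform distance computed
-- from clockwise perimeter-ring coordinates (objective: simpler).


-- ===== PORT A =====
def bouncer (W : Int) (L : Int) (N : Int) (arr : List (List Int)) (dir : Int) (dist : Int) : Int :=
  (PySem.List.pyRange 0 N 1).foldl (fun total i =>
    let row := PySem.List.pyGetD arr i []
    let s := PySem.List.pyGetD row 0 0
    let c := PySem.List.pyGetD row 1 0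
    if dir = s then total + |dist - c|
    else if (dir = 1 ∧ s = 2) ∨ (dir = 2 ∧ s = 1) then
      total + min (L + dist + c) (L + (W - dist) + (W - c))
    else if (dir = 1 ∧ s = 3) ∨ (dir = 3 ∧ s = 1) then total + (dist + c)
    else if dir = 1 ∧ s = 4 then total + ((W - dist) + c)
    else if dir = 4 ∧ s = 1 then total + ((W - c) + dist)
    else if dir = 2 ∧ s = 3 then total + (dist + (L - c))
    else if dir = 3 ∧ s = 2 then total + (c + (L - dist))
    else if dir = 2 ∧ s = 4 then total + ((W - dist) + (L - c))
    else if dir = 4 ∧ s = 2 then total + ((L - dist) + (W - c))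
    else if (dir = 3 ∧ s = 4) ∨ (dir = 4 ∧ s = 3) then
      total + min (W + dist + c) (W + (L - dist) + (L - c))
    else total) 0

-- ===== PORT B =====
-- clockwise ring index of a side code; -1 for an unknown code
def pvRing (side : Int) : Int :=
  if side = 1 then 0 else if side = 4 then 1
  else if side = 2 then 2 else if side = 3 then 3 else -1

-- linear coordinate along the clockwise perimeter ring (P = 2*(W+L))
def pvPos (W : Int) (L : Int) (P : Int) (side : Int) (c : Int) : Int :=
  if side = 1 then c else if side = 4 then W + c
  else if side = 2 then 2 * W + L - c else P - c

def bouncer_alt (W : Int) (L : Int) (N : Int) (arr : List (List Int)) (dir : Int) (dist : Int) : Int :=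
  let P := 2 * (W + L)
  (PySem.List.slice arr (some 0) (some (max 0 N))).foldl (fun total mart =>
    let side := PySem.List.pyGetD mart 0 0
    let c := PySem.List.pyGetD mart 1 0
    if side = dir then total + |dist - c|
    else
      let rg := pvRing dir
      let rm := pvRing side
      if rg < 0 ∨ rm < 0 then total
      else
        let tg := pvPos W L P dir dist
        let tm := pvPos W L P side c
        let q := if rg < rm then (rg, tg, rm, tm) else (rm, tm, rg, tg)
        if q.2.2.1 - q.1 = 2 then total + min (q.2.2.2 - q.2.1) (P - (q.2.2.2 - q.2.1))
        else if q.2.2.1 - q.1 = 1 then total + (q.2.2.2 - q.2.1)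
        else total + (q.2.1 + P - q.2.2.2)) 0

-- ===== PRECONDITION & SPEC =====
-- Pre_ excludes inputs on which A raises IndexError (N beyond arr, or a visited row
-- shorter than 2); it also excludes length-1 rows whose side code matches no branch,
-- on which A returns without reading the second entry while B always reads it and raises.
def Pre_bouncer (W : Int) (L : Int) (N : Int) (arr : List (List Int)) (dir : Int) (dist : Int) : Prop :=
  N ≤ arr.length ∧ ∀ row ∈ arr.take N.toNat, 2 ≤ row.length
instance (W : Int) (L : Int) (N : Int) (arr : List (List Int)) (dir : Int) (dist : Int) : Decidable (Pre_bouncer W L N arr dir dist) := by unfold Pre_bouncer; infer_instance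

def pvWitness_bouncer : Int × Int × Int × List (List Int) × Int × Int :=
  (3, 2, 2, [[1, 1], [2, 2]], 3, 1)

def Spec_bouncer (W : Int) (L : Int) (N : Int) (arr : List (List Int)) (dir : Int) (dist : Int) (out : Int) : Prop := out = bouncer_alt W L N arr dir dist
instance (W : Int) (L : Int) (N : Int) (arr : List (List Int)) (dir : Int) (dist : Int) (out : Int) : Decidable (Spec_bouncer W L N arr dir dist out) := by unfold Spec_bouncer; infer_instance

-- ===== CLAIM (what is proved, stated in full; the proofs are below) =====
def Claim_equal_bouncer : Prop := ∀ (W : Int) (L : Int) (N : Int) (arr : List (List Int)) (dir : Int) (dist : Int), Dom_bouncer W L N arr dir dist → Pre_bouncer W L N arr dir dist → Spec_bouncer W L N arr dir dist (bouncer W L N arr dir dist)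

-- ===== LEMMAS AND PROOFS =====

-- Per-row: A's branch table and B's ring computation add the same amount.
theorem pv_step_eq (W L dir dist total s c : Int) :
    (if dir = s then total + |dist - c|
     else if (dir = 1 ∧ s = 2) ∨ (dir = 2 ∧ s = 1) then
       total + min (L + dist + c) (L + (W - dist) + (W - c))
     else if (dir = 1 ∧ s = 3) ∨ (dir = 3 ∧ s = 1) then total + (dist + c)
     else if dir = 1 ∧ s = 4 then total + ((W - dist) + c)
     else if dir = 4 ∧ s = 1 then total + ((W - c) + dist)
     else if dir = 2 ∧ s = 3 then total + (dist + (L - c))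
     else if dir = 3 ∧ s = 2 then total + (c + (L - dist))
     else if dir = 2 ∧ s = 4 then total + ((W - dist) + (L - c))
     else if dir = 4 ∧ s = 2 then total + ((L - dist) + (W - c))
     else if (dir = 3 ∧ s = 4) ∨ (dir = 4 ∧ s = 3) then
       total + min (W + dist + c) (W + (L - dist) + (L - c))
     else total)
    =
    (if s = dir then total + |dist - c|
     else
       let rg := pvRing dir
       let rm := pvRing s
       if rg < 0 ∨ rm < 0 then total
       else
        let tg := pvPos W L (2 * (W + L)) dir dist
        let tm := pvPos W L (2 * (W + L)) s c
        let q := if rg < rm then (rg, tg, rm, tm) else (rm, tm, rg, tg)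
        if q.2.2.1 - q.1 = 2 then total + min (q.2.2.2 - q.2.1) ((2 * (W + L)) - (q.2.2.2 - q.2.1))
        else if q.2.2.1 - q.1 = 1 then total + (q.2.2.2 - q.2.1)
        else total + (q.2.1 + (2 * (W + L)) - q.2.2.2)) := by
  by_cases h : dir = s
  · simp [h]
  · have h' : ¬ s = dir := fun e => h e.symm
    simp only [pvRing, pvPos, if_neg h, if_neg h']
    by_cases d1 : dir = 1 <;> by_cases d2 : dir = 2 <;> by_cases d3 : dir = 3 <;>
      by_cases d4 : dir = 4 <;>
    by_cases s1 : s = 1 <;> by_cases s2 : s = 2 <;> by_cases s3 : s = 3 <;>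
      by_cases s4 : s = 4 <;>
    simp_all <;> omega

-- ===== VERDICT (by name: the statement is the Claim_ definition above) =====
theorem bouncer_spec : Claim_equal_bouncer := by
  intro W L N arr dir dist _ hpre
  obtain ⟨hN, hrows⟩ := hpre
  unfold Spec_bouncer bouncer bouncer_alt
  -- B's slice is arr.take N.toNat
  have hmax : (max 0 N : Int) = (N.toNat : Int) := by omega
  rw [hmax, PySem.List.slice_zero_start, PySem.List.slice_to_natCast]
  -- A's fold over range(N) indexes arr; rewrite it as a fold over arr.take N.toNat
  by_cases hneg : N ≤ 0
  · have h0 : N.toNat = 0 := by omega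
    have : PySem.List.pyRange 0 N 1 = [] := by
      simp [PySem.List.pyRange]; omega
    simp [this, h0]
  · have hlen : ((arr.take N.toNat).length : Int) = N := by
      simp [List.length_take]; omega
    have hA :
        (PySem.List.pyRange 0 N 1).foldl (fun total i =>
          (fun tot (row : List Int) =>
            let s := PySem.List.pyGetD row 0 0
            let c := PySem.List.pyGetD row 1 0
            if dir = s then tot + |dist - c|
            else if (dir = 1 ∧ s = 2) ∨ (dir = 2 ∧ s = 1) then
              tot + min (L + dist + c) (L + (W - dist) + (W - c))
            else if (dir = 1 ∧ s = 3) ∨ (dir = 3 ∧ s = 1) then tot + (dist + c)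
            else if dir = 1 ∧ s = 4 then tot + ((W - dist) + c)
            else if dir = 4 ∧ s = 1 then tot + ((W - c) + dist)
            else if dir = 2 ∧ s = 3 then tot + (dist + (L - c))
            else if dir = 3 ∧ s = 2 then tot + (c + (L - dist))
            else if dir = 2 ∧ s = 4 then tot + ((W - dist) + (L - c))
            else if dir = 4 ∧ s = 2 then tot + ((L - dist) + (W - c))
            else if (dir = 3 ∧ s = 4) ∨ (dir = 4 ∧ s = 3) then
              tot + min (W + dist + c) (W + (L - dist) + (L - c))
            else tot) total (PySem.List.pyGetD arr i []))
          0
        =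
        (arr.take N.toNat).foldl (fun tot row =>
            let s := PySem.List.pyGetD row 0 0
            let c := PySem.List.pyGetD row 1 0
            if dir = s then tot + |dist - c|
            else if (dir = 1 ∧ s = 2) ∨ (dir = 2 ∧ s = 1) then
              tot + min (L + dist + c) (L + (W - dist) + (W - c))
            else if (dir = 1 ∧ s = 3) ∨ (dir = 3 ∧ s = 1) then tot + (dist + c)
            else if dir = 1 ∧ s = 4 then tot + ((W - dist) + c)
            else if dir = 4 ∧ s = 1 then tot + ((W - c) + dist)
            else if dir = 2 ∧ s = 3 then tot + (dist + (L - c))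
            else if dir = 3 ∧ s = 2 then tot + (c + (L - dist))
            else if dir = 2 ∧ s = 4 then tot + ((W - dist) + (L - c))
            else if dir = 4 ∧ s = 2 then tot + ((L - dist) + (W - c))
            else if (dir = 3 ∧ s = 4) ∨ (dir = 4 ∧ s = 3) then
              tot + min (W + dist + c) (W + (L - dist) + (L - c))
            else tot) 0 := by
      have hR : PySem.List.pyRange 0 N 1
          = PySem.List.pyRange 0 ((arr.take N.toNat).length : Int) 1 := by rw [hlen]
      rw [hR, ← PySem.List.foldl_pyRange_zero_pyGetD' (arr.take N.toNat) []]
      apply PySem.List.foldl_congr_mem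
      intro acc i hi
      have hi' := PySem.List.mem_pyRange_one.mp hi
      have h0i : 0 ≤ i := hi'.1
      have hiN : i < N := by
        have := hi'.2; omega
      congr 1
      rw [PySem.List.pyGetD_eq_getElem (xs := arr) (i := i) (d := []) h0i (by omega),
          PySem.List.pyGetD_eq_getElem (xs := arr.take N.toNat) (i := i) (d := []) h0i (by omega)]
      rw [List.getElem_take]
    rw [hA]
    apply PySem.List.foldl_congr_mem
    intro acc row _
    exact pv_step_eq W L dir dist acc (PySem.List.pyGetD row 0 0) (PySem.List.pyGetD row 1 0)
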